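-- pv_equiv track=rewrite | github.com/jparish1977/telnet-dungeon | dungeon/guild/craftsman.py | _flood_reachable
-- ===== SOURCE A (Python) =====
-- def _flood_reachable(grid, start_x, start_y, passable=None):
--     """BFS from a point, return set of reachable (x,y) tuples."""
--     size = len(grid)
--     if passable is None:
--         passable = {0, 2, 3, 4, 5, 6, 7}  # everything except walls (7=secret wall, passable)
--     visited = set()
--     stack = [(start_x, start_y)]
--     while stack:
--         x, y = stack.pop()
--         if (x, y) in visited:
--             continue
--         if not (0 <= x < size and 0 <= y < size):
--             continue
--         if grid[y][x] not in passable: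
--             continue
--         visited.add((x, y))
--         stack.extend([(x+1, y), (x-1, y), (x, y+1), (x, y-1)])
--     return visited
-- ===== SOURCE B (Python) =====
-- def _flood_reachable(grid, start_x, start_y, passable=None):
--     """Layered BFS with set algebra: expand a whole frontier wave per
--     iteration instead of popping one cell at a time from a stack."""
--     size = len(grid)
--     if passable is None:
--         passable = {0, 2, 3, 4, 5, 6, 7}
--     visited = set()
--     frontier = {(start_x, start_y)}
--     while True:
--         frontier = {(x, y) for (x, y) in frontier
--                     if (x, y) not in visited
--                     and 0 <= x < size and 0 <= y < size
--                     and grid[y][x] in passable}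
--         if not frontier:
--             return visited
--         visited |= frontier
--         frontier = {(x + dx, y + dy) for (x, y) in frontier
--                     for dx, dy in ((1, 0), (-1, 0), (0, 1), (0, -1))}
-- ===== Notes on version B (the rewrite author's own statement) =====
-- stated objective: alternative
-- what changed: A is a depth-first flood fill popping one cell at a time off an explicit stack; B is a layered breadth-first fill that keeps a whole frontier set, filters it against visited/bounds/passability with set comprehensions, unions it into visited and expands it to all four-neighbours in one step per wave.
-- outside the precondition, e.g. on _flood_reachable([[1], [0, 0]], 0, 0, None): A returns set(), B returns set()
import Mathlib
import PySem

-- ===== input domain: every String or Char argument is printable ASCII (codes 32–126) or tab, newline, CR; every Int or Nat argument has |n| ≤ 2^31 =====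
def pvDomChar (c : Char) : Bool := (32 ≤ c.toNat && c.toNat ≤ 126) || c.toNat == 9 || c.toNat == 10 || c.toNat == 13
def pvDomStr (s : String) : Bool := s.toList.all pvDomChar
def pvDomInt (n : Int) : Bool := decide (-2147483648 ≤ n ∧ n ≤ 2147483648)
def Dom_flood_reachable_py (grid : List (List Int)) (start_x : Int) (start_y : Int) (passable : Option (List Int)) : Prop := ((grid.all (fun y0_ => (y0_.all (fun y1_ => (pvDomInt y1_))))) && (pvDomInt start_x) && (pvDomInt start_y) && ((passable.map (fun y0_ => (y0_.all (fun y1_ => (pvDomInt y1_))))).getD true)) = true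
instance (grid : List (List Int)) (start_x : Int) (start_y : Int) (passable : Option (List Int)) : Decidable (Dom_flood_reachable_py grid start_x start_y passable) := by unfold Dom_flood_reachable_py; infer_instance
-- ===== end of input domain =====

-- B replaces A's one-cell-at-a-time DFS stack by a layered BFS that expands a whole frontier
-- set per iteration (alternative decomposition, no speed claim). The Python function returns a
-- SET (no element order); both ports return that set's elements in sorted order — the canonical
-- list representation of the set value. Return value only; neither version mutates an argument.

-- ===== PORT A =====

-- A's neighbour push order: stack.extend([(x+1,y),(x-1,y),(x,y+1),(x,y-1)])
def pvNbrsA (x y : Int) : List (Int × Int) := [(x+1, y), (x-1, y), (x, y+1), (x, y-1)]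

-- {0, 2, 3, 4, 5, 6, 7}
def pvDefaultPassable : List Int := PySem.Set.ofList [0, 2, 3, 4, 5, 6, 7]

-- canonical ordering key for the returned set's elements (lexicographic on the pair)
def pvKey (c : Int × Int) : Lex (Int × Int) := toLex c

-- all cells of the size×size board (termination-measure universe, not part of either algorithm)
def pvCells (n : Nat) : List (Int × Int) :=
  (List.range n).flatMap (fun yy => (List.range n).map (fun xx => (Int.ofNat xx, Int.ofNat yy)))

-- number of board cells not yet visited (termination measure)
def pvMu (n : Nat) (v : List (Int × Int)) : Nat :=
  (pvCells n).countP (fun c => !(PySem.Set.contains v c))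

theorem pvMem_cells {n : Nat} {c : Int × Int} (h1 : 0 ≤ c.1) (h2 : c.1 < (n : Int))
    (h3 : 0 ≤ c.2) (h4 : c.2 < (n : Int)) : c ∈ pvCells n := by
  have ha : c.1.toNat < n := by omega
  have hb : c.2.toNat < n := by omega
  have hpair : (Int.ofNat c.1.toNat, Int.ofNat c.2.toNat) = c := by
    obtain ⟨a, b⟩ := c; simp_all [Int.ofNat_toNat]
  exact List.mem_flatMap.mpr ⟨c.2.toNat, List.mem_range.mpr hb,
    List.mem_map.mpr ⟨c.1.toNat, List.mem_range.mpr ha, hpair⟩⟩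

theorem pvCountP_lt {α : Type} (l : List α) (p q : α → Bool)
    (hpq : ∀ a ∈ l, q a = true → p a = true) (a : α) (ha : a ∈ l)
    (hq : q a = false) (hp : p a = true) : l.countP q < l.countP p := by
  induction l with
  | nil => cases ha
  | cons b t ih =>
    have hmono : t.countP q ≤ t.countP p :=
      List.countP_mono_left (fun x hx => hpq x (by simp [hx]))
    simp only [List.countP_cons]
    rcases List.mem_cons.mp ha with rfl | hat
    · simp [hq, hp]
      omega
    · have := ih (fun x hx => hpq x (by simp [hx])) hat
      rcases hb : q b with _ | _ <;> rcases hc : p b with _ | _ <;> simp_all <;> omega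

theorem pvMu_add_lt {n : Nat} {v : List (Int × Int)} {c : Int × Int}
    (hc : c ∈ pvCells n) (hv : PySem.Set.contains v c = false) :
    pvMu n (PySem.Set.add v c) < pvMu n v := by
  have hnm : c ∉ v := fun h => by rw [(PySem.Set.contains_iff _ _).mpr h] at hv; cases hv
  unfold pvMu
  refine pvCountP_lt _ _ _ ?_ c hc ?_ ?_
  · intro a _ h
    simp only [Bool.not_eq_true'] at h ⊢
    cases hav : PySem.Set.contains v a with
    | false => rfl
    | true =>
      have : a ∈ PySem.Set.add v c := by
        simp [PySem.Set.mem_add, (PySem.Set.contains_iff _ _).mp hav]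
      rw [(PySem.Set.contains_iff _ _).mpr this] at h; cases h
  · have : c ∈ PySem.Set.add v c := by simp [PySem.Set.mem_add]
    simp [this]
  · simp only [Bool.not_eq_true', hv]

theorem pvDropLast_lt {α : Type} (s : List α) (hs : s ≠ []) :
    s.dropLast.length < s.length := by
  have h0 : s.length ≠ 0 := fun h => hs (List.eq_nil_of_length_eq_zero h)
  rw [List.length_dropLast]; omega

-- the while-loop of A: worklist of single cells, top of the stack at the END
-- (stack.pop() / stack.extend)
def pvLoopA (grid : List (List Int)) (pass : List Int)
    (v : List (Int × Int)) (s : List (Int × Int)) : List (Int × Int) :=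
  if hs : s = [] then v
  -- (x, y) = stack.pop(); the three 'continue' guards, in A's order
  else if hcv : PySem.Set.contains v (s.getLast hs) then pvLoopA grid pass v s.dropLast
  else if hb : ¬(0 ≤ (s.getLast hs).1 ∧ (s.getLast hs).1 < (grid.length : Int) ∧
      0 ≤ (s.getLast hs).2 ∧ (s.getLast hs).2 < (grid.length : Int)) then
    pvLoopA grid pass v s.dropLast
  else if hpv : pass.contains
      (PySem.List.pyGetD (PySem.List.pyGetD grid (s.getLast hs).2 []) (s.getLast hs).1 0) = false then
    pvLoopA grid pass v s.dropLast
  else pvLoopA grid pass (PySem.Set.add v (s.getLast hs))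
    (s.dropLast ++ pvNbrsA (s.getLast hs).1 (s.getLast hs).2)
termination_by (pvMu grid.length v, s.length)
decreasing_by
  · exact Prod.Lex.right _ (pvDropLast_lt s hs)
  · exact Prod.Lex.right _ (pvDropLast_lt s hs)
  · exact Prod.Lex.right _ (pvDropLast_lt s hs)
  · apply Prod.Lex.left
    push_neg at hb
    exact pvMu_add_lt (pvMem_cells hb.1 hb.2.1 hb.2.2.1 hb.2.2.2) (by simpa using hcv)

def flood_reachable_py (grid : List (List Int)) (start_x : Int) (start_y : Int)
    (passable : Option (List Int)) : List (Int × Int) :=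
  let pass := match passable with
    | none => pvDefaultPassable
    | some l => l
  -- 'return visited': the set's elements, in canonical (sorted) order
  PySem.List.sorted (pvLoopA grid pass PySem.Set.empty [(start_x, start_y)]) pvKey false

-- ===== PORT B =====

-- B's neighbour offsets ((1,0),(-1,0),(0,1),(0,-1)) applied to a cell
def pvNbrsB (x y : Int) : List (Int × Int) := [(x+1, y), (x-1, y), (x, y+1), (x, y-1)]

-- the guard of B's first comprehension (without the 'not in visited' part):
-- in bounds and passable
def pvOkB (grid : List (List Int)) (pass : List Int) (c : Int × Int) : Bool :=
  decide (0 ≤ c.1) && decide (c.1 < (grid.length : Int)) &&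
  decide (0 ≤ c.2) && decide (c.2 < (grid.length : Int)) &&
  pass.contains (PySem.List.pyGetD (PySem.List.pyGetD grid c.2 []) c.1 0)

-- first comprehension: keep the frontier cells that are new, in bounds and passable
def pvKeep (grid : List (List Int)) (pass : List Int)
    (v f : List (Int × Int)) : List (Int × Int) :=
  f.filter (fun c => !(PySem.Set.contains v c) && pvOkB grid pass c)

-- second comprehension: the set of all four-neighbours of the frontier cells
def pvExpand (f : List (Int × Int)) : List (Int × Int) :=
  PySem.Set.ofList (f.flatMap (fun c => pvNbrsB c.1 c.2))

theorem pvMu_update_lt {n : Nat} {v f : List (Int × Int)} {c : Int × Int}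
    (hc : c ∈ f) (hcell : c ∈ pvCells n) (hv : PySem.Set.contains v c = false) :
    pvMu n (PySem.Set.update v f) < pvMu n v := by
  unfold pvMu
  refine pvCountP_lt _ _ _ ?_ c hcell ?_ ?_
  · intro a _ h
    simp only [Bool.not_eq_true'] at h ⊢
    cases hav : PySem.Set.contains v a with
    | false => rfl
    | true =>
      have : a ∈ PySem.Set.update v f := by
        simp [PySem.Set.mem_update, (PySem.Set.contains_iff _ _).mp hav]
      rw [(PySem.Set.contains_iff _ _).mpr this] at h; cases h
  · have : c ∈ PySem.Set.update v f := by simp [PySem.Set.mem_update, hc]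
    simp [this]
  · simp only [Bool.not_eq_true', hv]

-- the while-loop of B: one iteration = filter the frontier, stop if empty,
-- union it into visited, expand it to the next frontier
def pvLoopB (grid : List (List Int)) (pass : List Int)
    (v f : List (Int × Int)) : List (Int × Int) :=
  if h : pvKeep grid pass v f = [] then v
  else
    pvLoopB grid pass (PySem.Set.update v (pvKeep grid pass v f))
      (pvExpand (pvKeep grid pass v f))
termination_by pvMu grid.length v
decreasing_by
  obtain ⟨c, hc⟩ := List.exists_mem_of_ne_nil _ h
  have hc' := List.mem_filter.mp hc
  have hg := hc'.2
  simp only [Bool.and_eq_true, Bool.not_eq_true', pvOkB, decide_eq_true_eq] at hg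
  exact pvMu_update_lt hc
    (pvMem_cells hg.2.1.1.1.1 hg.2.1.1.1.2 hg.2.1.1.2 hg.2.1.2) hg.1

def flood_reachable_py_alt (grid : List (List Int)) (start_x : Int) (start_y : Int)
    (passable : Option (List Int)) : List (Int × Int) :=
  let pass := match passable with
    | none => pvDefaultPassable
    | some l => l
  -- 'return visited': the set's elements, in canonical (sorted) order
  PySem.List.sorted (pvLoopB grid pass PySem.Set.empty [(start_x, start_y)]) pvKey false

-- ===== PRECONDITION & SPEC =====
-- Pre_ excludes ragged grids with an in-bounds start: there the Python A can index a row shorter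
-- than len(grid) and raise IndexError (it also excludes some ragged grids whose short rows A
-- never actually reaches, on which A returns normally).
def Pre_flood_reachable_py (grid : List (List Int)) (start_x : Int) (start_y : Int) (passable : Option (List Int)) : Prop :=
  (∀ row ∈ grid, grid.length ≤ row.length)
  ∨ ¬(0 ≤ start_x ∧ start_x < (grid.length : Int) ∧ 0 ≤ start_y ∧ start_y < (grid.length : Int))
instance (grid : List (List Int)) (start_x : Int) (start_y : Int) (passable : Option (List Int)) : Decidable (Pre_flood_reachable_py grid start_x start_y passable) := by unfold Pre_flood_reachable_py; infer_instance
def pvWitness_flood_reachable_py : List (List Int) × Int × Int × Option (List Int) := ([[0, 1], [7, 2]], 0, 0, none)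

def Spec_flood_reachable_py (grid : List (List Int)) (start_x : Int) (start_y : Int) (passable : Option (List Int)) (out : List (Int × Int)) : Prop := out = flood_reachable_py_alt grid start_x start_y passable
instance (grid : List (List Int)) (start_x : Int) (start_y : Int) (passable : Option (List Int)) (out : List (Int × Int)) : Decidable (Spec_flood_reachable_py grid start_x start_y passable out) := by unfold Spec_flood_reachable_py; infer_instance

-- ===== CLAIM (what is proved, stated in full; the proofs are below) =====
def Claim_equal_flood_reachable_py : Prop := ∀ (grid : List (List Int)) (start_x : Int) (start_y : Int) (passable : Option (List Int)), Dom_flood_reachable_py grid start_x start_y passable → Pre_flood_reachable_py grid start_x start_y passable → Spec_flood_reachable_py grid start_x start_y passable (flood_reachable_py grid start_x start_y passable)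

-- ===== LEMMAS AND PROOFS =====

-- a cell is "good" when it is in bounds and its tile is passable
def pvGood (grid : List (List Int)) (pass : List Int) (c : Int × Int) : Prop :=
  (0 ≤ c.1 ∧ c.1 < (grid.length : Int) ∧ 0 ≤ c.2 ∧ c.2 < (grid.length : Int)) ∧
  pass.contains (PySem.List.pyGetD (PySem.List.pyGetD grid c.2 []) c.1 0) = true

-- one flood-fill step between good cells
def pvStep (grid : List (List Int)) (pass : List Int) (a b : Int × Int) : Prop :=
  pvGood grid pass a ∧ b ∈ pvNbrsA a.1 a.2 ∧ pvGood grid pass b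

-- the characterisation both loops compute: reachable-and-good cells
def pvReach (grid : List (List Int)) (pass : List Int) (s0 c : Int × Int) : Prop :=
  pvGood grid pass c ∧ Relation.ReflTransGen (pvStep grid pass) s0 c

theorem pvOkB_iff (grid : List (List Int)) (pass : List Int) (c : Int × Int) :
    pvOkB grid pass c = true ↔ pvGood grid pass c := by
  simp [pvOkB, pvGood, and_assoc]

theorem pvKeep_mem {grid : List (List Int)} {pass : List Int}
    {v f : List (Int × Int)} {c : Int × Int} :
    c ∈ pvKeep grid pass v f ↔ c ∈ f ∧ c ∉ v ∧ pvGood grid pass c := by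
  simp only [pvKeep, List.mem_filter, Bool.and_eq_true, Bool.not_eq_true', pvOkB_iff,
    Bool.eq_false_iff, ne_eq, PySem.Set.contains_iff]

theorem pvLoopA_sound (grid : List (List Int)) (pass : List Int) (s0 : Int × Int)
    (v s : List (Int × Int))
    (h1 : ∀ c ∈ v, pvReach grid pass s0 c)
    (h2 : ∀ c ∈ s, pvGood grid pass c → Relation.ReflTransGen (pvStep grid pass) s0 c) :
    ∀ c ∈ pvLoopA grid pass v s, pvReach grid pass s0 c := by
  induction v, s using pvLoopA.induct grid pass with
  | case1 v => rw [pvLoopA]; simp only [reduceDIte]; exact h1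
  | case2 v s hs hcv ih =>
    rw [pvLoopA]; simp only [dif_neg hs, dif_pos hcv]
    exact ih h1 (fun c hc => h2 c ((List.dropLast_sublist s).subset hc))
  | case3 v s hs hcv hb ih =>
    rw [pvLoopA]; simp only [dif_neg hs, dif_neg hcv, dif_pos hb]
    exact ih h1 (fun c hc => h2 c ((List.dropLast_sublist s).subset hc))
  | case4 v s hs hcv hb hpv ih =>
    rw [pvLoopA]; simp only [dif_neg hs, dif_neg hcv, dif_neg hb, dif_pos hpv]
    exact ih h1 (fun c hc => h2 c ((List.dropLast_sublist s).subset hc))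
  | case5 v s hs hcv hb hpv ih =>
    rw [pvLoopA]; simp only [dif_neg hs, dif_neg hcv, dif_neg hb, dif_neg hpv]
    push_neg at hb
    have hgood : pvGood grid pass (s.getLast hs) := ⟨hb, by simpa using hpv⟩
    have hrtg : Relation.ReflTransGen (pvStep grid pass) s0 (s.getLast hs) :=
      h2 _ (List.getLast_mem hs) hgood
    apply ih
    · intro c hc
      rcases (PySem.Set.mem_add v _ c).mp hc with h | rfl
      · exact h1 c h
      · exact ⟨hgood, hrtg⟩
    · intro c hc hgc
      rcases List.mem_append.mp hc with h | h
      · exact h2 c ((List.dropLast_sublist s).subset h) hgc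
      · exact hrtg.tail ⟨hgood, h, hgc⟩

theorem pvLoopA_closed (grid : List (List Int)) (pass : List Int) (s0 : Int × Int)
    (v s : List (Int × Int))
    (hcl : ∀ c ∈ v, ∀ d ∈ pvNbrsA c.1 c.2, pvGood grid pass d → d ∈ v ∨ d ∈ s)
    (hst : pvGood grid pass s0 → s0 ∈ v ∨ s0 ∈ s) :
    (pvGood grid pass s0 → s0 ∈ pvLoopA grid pass v s) ∧
    (∀ c ∈ pvLoopA grid pass v s, ∀ d ∈ pvNbrsA c.1 c.2, pvGood grid pass d →
      d ∈ pvLoopA grid pass v s) := by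
  induction v, s using pvLoopA.induct grid pass with
  | case1 v =>
    rw [pvLoopA]; simp only [reduceDIte]
    refine ⟨fun hg => ?_, fun c hc d hd hgd => ?_⟩
    · rcases hst hg with h | h
      · exact h
      · simp at h
    · rcases hcl c hc d hd hgd with h | h
      · exact h
      · simp at h
  | case2 v s hs hcv ih =>
    rw [pvLoopA]; simp only [dif_neg hs, dif_pos hcv]
    have hmem : ∀ d : Int × Int, d ∈ s ↔ d ∈ s.dropLast ∨ d = s.getLast hs := fun d => by
      conv_lhs => rw [← List.dropLast_append_getLast hs]
      simp
    have hcmem : s.getLast hs ∈ v := (PySem.Set.contains_iff _ _).mp hcv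
    apply ih
    · intro c hc d hd hgd
      rcases hcl c hc d hd hgd with h | h
      · exact Or.inl h
      · rcases (hmem d).mp h with h' | h'
        · exact Or.inr h'
        · exact Or.inl (h' ▸ hcmem)
    · intro hg
      rcases hst hg with h | h
      · exact Or.inl h
      · rcases (hmem s0).mp h with h' | h'
        · exact Or.inr h'
        · exact Or.inl (h' ▸ hcmem)
  | case3 v s hs hcv hb ih =>
    rw [pvLoopA]; simp only [dif_neg hs, dif_neg hcv, dif_pos hb]
    have hmem : ∀ d : Int × Int, d ∈ s ↔ d ∈ s.dropLast ∨ d = s.getLast hs := fun d => by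
      conv_lhs => rw [← List.dropLast_append_getLast hs]
      simp
    have hng : ¬ pvGood grid pass (s.getLast hs) := fun hg => hb hg.1
    apply ih
    · intro c hc d hd hgd
      rcases hcl c hc d hd hgd with h | h
      · exact Or.inl h
      · rcases (hmem d).mp h with h' | h'
        · exact Or.inr h'
        · exact absurd (h' ▸ hgd) hng
    · intro hg
      rcases hst hg with h | h
      · exact Or.inl h
      · rcases (hmem s0).mp h with h' | h'
        · exact Or.inr h'
        · exact absurd (h' ▸ hg) hng
  | case4 v s hs hcv hb hpv ih =>
    rw [pvLoopA]; simp only [dif_neg hs, dif_neg hcv, dif_neg hb, dif_pos hpv]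
    have hmem : ∀ d : Int × Int, d ∈ s ↔ d ∈ s.dropLast ∨ d = s.getLast hs := fun d => by
      conv_lhs => rw [← List.dropLast_append_getLast hs]
      simp
    have hng : ¬ pvGood grid pass (s.getLast hs) := fun hg => by
      have h2 := hg.2; rw [hpv] at h2; exact Bool.false_ne_true h2
    apply ih
    · intro c hc d hd hgd
      rcases hcl c hc d hd hgd with h | h
      · exact Or.inl h
      · rcases (hmem d).mp h with h' | h'
        · exact Or.inr h'
        · exact absurd (h' ▸ hgd) hng
    · intro hg
      rcases hst hg with h | h
      · exact Or.inl h
      · rcases (hmem s0).mp h with h' | h'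
        · exact Or.inr h'
        · exact absurd (h' ▸ hg) hng
  | case5 v s hs hcv hb hpv ih =>
    rw [pvLoopA]; simp only [dif_neg hs, dif_neg hcv, dif_neg hb, dif_neg hpv]
    have hmem : ∀ d : Int × Int, d ∈ s ↔ d ∈ s.dropLast ∨ d = s.getLast hs := fun d => by
      conv_lhs => rw [← List.dropLast_append_getLast hs]
      simp
    apply ih
    · intro c hc d hd hgd
      rcases (PySem.Set.mem_add v _ c).mp hc with h | h
      · rcases hcl c h d hd hgd with h' | h'
        · exact Or.inl ((PySem.Set.mem_add v _ d).mpr (Or.inl h'))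
        · rcases (hmem d).mp h' with h'' | h''
          · exact Or.inr (List.mem_append.mpr (Or.inl h''))
          · exact Or.inl ((PySem.Set.mem_add v _ d).mpr (Or.inr h''))
      · exact Or.inr (List.mem_append.mpr (Or.inr (h ▸ hd)))
    · intro hg
      rcases hst hg with h | h
      · exact Or.inl ((PySem.Set.mem_add v _ s0).mpr (Or.inl h))
      · rcases (hmem s0).mp h with h' | h'
        · exact Or.inr (List.mem_append.mpr (Or.inl h'))
        · exact Or.inl ((PySem.Set.mem_add v _ s0).mpr (Or.inr h'))

theorem pvLoopA_nodup (grid : List (List Int)) (pass : List Int)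
    (v s : List (Int × Int)) (hv : v.Nodup) : (pvLoopA grid pass v s).Nodup := by
  induction v, s using pvLoopA.induct grid pass with
  | case1 v => rw [pvLoopA]; simp only [reduceDIte]; exact hv
  | case2 v s hs hcv ih => rw [pvLoopA]; simp only [dif_neg hs, dif_pos hcv]; exact ih hv
  | case3 v s hs hcv hb ih =>
    rw [pvLoopA]; simp only [dif_neg hs, dif_neg hcv, dif_pos hb]; exact ih hv
  | case4 v s hs hcv hb hpv ih =>
    rw [pvLoopA]; simp only [dif_neg hs, dif_neg hcv, dif_neg hb, dif_pos hpv]; exact ih hv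
  | case5 v s hs hcv hb hpv ih =>
    rw [pvLoopA]; simp only [dif_neg hs, dif_neg hcv, dif_neg hb, dif_neg hpv]
    exact ih (PySem.Set.nodup_add v _ hv)

theorem pvLoopB_sound (grid : List (List Int)) (pass : List Int) (s0 : Int × Int)
    (v f : List (Int × Int))
    (h1 : ∀ c ∈ v, pvReach grid pass s0 c)
    (h2 : ∀ c ∈ f, pvGood grid pass c → Relation.ReflTransGen (pvStep grid pass) s0 c) :
    ∀ c ∈ pvLoopB grid pass v f, pvReach grid pass s0 c := by
  induction v, f using pvLoopB.induct grid pass with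
  | case1 v f h => rw [pvLoopB]; simp only [dif_pos h]; exact h1
  | case2 v f h ih =>
    rw [pvLoopB]; simp only [dif_neg h]
    apply ih
    · intro c hc
      rcases (PySem.Set.mem_update v _ c).mp hc with h' | h'
      · exact h1 c h'
      · obtain ⟨hcf, _, hg⟩ := pvKeep_mem.mp h'
        exact ⟨hg, h2 c hcf hg⟩
    · intro d hd hgd
      obtain ⟨c, hcf', hdn⟩ :=
        List.mem_flatMap.mp ((PySem.Set.mem_ofList _ d).mp hd)
      obtain ⟨hcf, _, hg⟩ := pvKeep_mem.mp hcf'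
      exact (h2 c hcf hg).tail ⟨hg, hdn, hgd⟩

theorem pvLoopB_closed (grid : List (List Int)) (pass : List Int) (s0 : Int × Int)
    (v f : List (Int × Int))
    (hcl : ∀ c ∈ v, ∀ d ∈ pvNbrsA c.1 c.2, pvGood grid pass d → d ∈ v ∨ d ∈ f)
    (hst : pvGood grid pass s0 → s0 ∈ v ∨ s0 ∈ f) :
    (pvGood grid pass s0 → s0 ∈ pvLoopB grid pass v f) ∧
    (∀ c ∈ pvLoopB grid pass v f, ∀ d ∈ pvNbrsA c.1 c.2, pvGood grid pass d →
      d ∈ pvLoopB grid pass v f) := by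
  induction v, f using pvLoopB.induct grid pass with
  | case1 v f h =>
    rw [pvLoopB]; simp only [dif_pos h]
    have hres : ∀ d ∈ f, pvGood grid pass d → d ∈ v := by
      intro d hdf hgd
      by_cases hdv : d ∈ v
      · exact hdv
      · exact absurd (pvKeep_mem.mpr ⟨hdf, hdv, hgd⟩) (by rw [h]; simp)
    refine ⟨fun hg => ?_, fun c hc d hd hgd => ?_⟩
    · rcases hst hg with h' | h'
      · exact h'
      · exact hres s0 h' hg
    · rcases hcl c hc d hd hgd with h' | h'
      · exact h'
      · exact hres d h' hgd
  | case2 v f h ih =>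
    rw [pvLoopB]; simp only [dif_neg h]
    have into : ∀ d ∈ f, pvGood grid pass d →
        d ∈ PySem.Set.update v (pvKeep grid pass v f) := by
      intro d hdf hgd
      by_cases hdv : d ∈ v
      · exact (PySem.Set.mem_update v _ d).mpr (Or.inl hdv)
      · exact (PySem.Set.mem_update v _ d).mpr (Or.inr (pvKeep_mem.mpr ⟨hdf, hdv, hgd⟩))
    apply ih
    · intro c hc d hd hgd
      rcases (PySem.Set.mem_update v _ c).mp hc with h' | h'
      · rcases hcl c h' d hd hgd with h'' | h''
        · exact Or.inl ((PySem.Set.mem_update v _ d).mpr (Or.inl h''))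
        · exact Or.inl (into d h'' hgd)
      · exact Or.inr ((PySem.Set.mem_ofList _ d).mpr (List.mem_flatMap.mpr ⟨c, h', hd⟩))
    · intro hg
      rcases hst hg with h' | h'
      · exact Or.inl ((PySem.Set.mem_update v _ s0).mpr (Or.inl h'))
      · exact Or.inl (into s0 h' hg)

theorem pvLoopB_nodup (grid : List (List Int)) (pass : List Int)
    (v f : List (Int × Int)) (hv : v.Nodup) : (pvLoopB grid pass v f).Nodup := by
  induction v, f using pvLoopB.induct grid pass with
  | case1 v f h => rw [pvLoopB]; simp only [dif_pos h]; exact hv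
  | case2 v f h ih =>
    rw [pvLoopB]; simp only [dif_neg h]
    exact ih (PySem.Set.nodup_update v _ hv)

-- a set containing the (good) start and closed under good-neighbour steps contains every reachable cell
theorem pvReach_mem (grid : List (List Int)) (pass : List Int) (s0 : Int × Int)
    (R : List (Int × Int))
    (h0 : pvGood grid pass s0 → s0 ∈ R)
    (hcl : ∀ c ∈ R, ∀ d ∈ pvNbrsA c.1 c.2, pvGood grid pass d → d ∈ R) :
    ∀ c, pvReach grid pass s0 c → c ∈ R := by
  have key : ∀ c, Relation.ReflTransGen (pvStep grid pass) s0 c →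
      pvGood grid pass c → c ∈ R := by
    intro c hrtg
    induction hrtg with
    | refl => exact h0
    | tail hab hbc ih =>
      intro _
      rename_i b c' _
      exact hcl b (ih hbc.1) c' hbc.2.1 hbc.2.2
  exact fun c hc => key c hc.2 hc.1

theorem pvLoop_mem_iff (grid : List (List Int)) (pass : List Int) (s0 : Int × Int) :
    ∀ c, c ∈ pvLoopA grid pass PySem.Set.empty [s0] ↔
         c ∈ pvLoopB grid pass PySem.Set.empty [s0] := by
  have hempty : ∀ c : Int × Int, c ∈ (PySem.Set.empty : List (Int × Int)) → False := by
    intro c hc; simp [PySem.Set.empty] at hc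
  have hinit : ∀ c ∈ [s0], pvGood grid pass c →
      Relation.ReflTransGen (pvStep grid pass) s0 c := by
    intro c hc _
    rcases List.mem_singleton.mp hc with rfl
    exact Relation.ReflTransGen.refl
  intro c
  constructor
  · intro hc
    have hr := pvLoopA_sound grid pass s0 _ _ (fun c hc => absurd hc (hempty c)) hinit c hc
    obtain ⟨hBst, hBcl⟩ := pvLoopB_closed grid pass s0 PySem.Set.empty [s0]
      (fun c hc => absurd hc (hempty c)) (fun _ => Or.inr (List.mem_singleton.mpr rfl))
    exact pvReach_mem grid pass s0 _ hBst hBcl c hr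
  · intro hc
    have hr := pvLoopB_sound grid pass s0 _ _ (fun c hc => absurd hc (hempty c)) hinit c hc
    obtain ⟨hAst, hAcl⟩ := pvLoopA_closed grid pass s0 PySem.Set.empty [s0]
      (fun c hc => absurd hc (hempty c)) (fun _ => Or.inr (List.mem_singleton.mpr rfl))
    exact pvReach_mem grid pass s0 _ hAst hAcl c hr

-- ===== VERDICT (by name: the statement is the Claim_ definition above) =====
theorem flood_reachable_py_spec : Claim_equal_flood_reachable_py := by
  intro grid start_x start_y passable _ _
  unfold Spec_flood_reachable_py flood_reachable_py flood_reachable_py_alt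
  refine PySem.List.sorted_eq_sorted_of_perm _ _ pvKey (fun a b h => h) ?_
  exact (List.perm_ext_iff_of_nodup
    (pvLoopA_nodup _ _ _ _ List.nodup_nil)
    (pvLoopB_nodup _ _ _ _ List.nodup_nil)).mpr
    (pvLoop_mem_iff grid _ (start_x, start_y))
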